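-- pv_equiv track=rewrite | github.com/KarolinaPSouza/dataset-pesquisa | 1634-Minimizing_Coins/4273650.py | seats
-- ===== SOURCE A (Python) =====
-- def seats(a):
--         b=[]
--         for i in range(len(a)):
--             if(a[i]=="x"):
--                 b.append(i)
--         n=len(a)
--         ans=10**7
--         for i in range(n-len(b)+1):
--             c=0
--             for j in range(i,i+len(b)):
--                 c=(c+abs(b[j-i]-j))%10000003
--             ans=min(ans,c)
--         return ans
-- ===== SOURCE B (Python) =====
-- def seats(a):
--     # sliding window: d[t] = b[t]-t is nondecreasing; maintain the window cost
--     # S_i = sum(|d[t]-i|) via the recurrence S_{i+1} = S_i + 2*p - k with a moving pointer p.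
--     b = [i for i, ch in enumerate(a) if ch == "x"]
--     n = len(a)
--     k = len(b)
--     M = 10000003
--     d = [b[t] - t for t in range(k)]
--     S = sum(d)  # d[t] >= 0, so S_0 = sum(|d[t] - 0|)
--     ans = min(10**7, S % M)
--     p = 0
--     for i in range(n - k):
--         while p < k and d[p] <= i:
--             p += 1
--         S += 2 * p - k
--         ans = min(ans, S % M)
--     return ans
-- ===== Notes on version B (the rewrite author's own statement) =====
-- stated objective: alternative
-- what changed: B replaces A's per-window re-summation (an inner loop over all k seat positions for each of the n-k+1 windows) by a sliding-window recurrence: with d[t]=b[t]-t nondecreasing, the window cost S_i = sum(|d[t]-i|) is updated in constant time per step via S_{i+1} = S_i + 2p - k, where the split pointer p only ever advances; intended as faster (O(n*k) vs O(n) inner work) but a timing run measured only ~1.3x on its generated inputs.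
import Mathlib
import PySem

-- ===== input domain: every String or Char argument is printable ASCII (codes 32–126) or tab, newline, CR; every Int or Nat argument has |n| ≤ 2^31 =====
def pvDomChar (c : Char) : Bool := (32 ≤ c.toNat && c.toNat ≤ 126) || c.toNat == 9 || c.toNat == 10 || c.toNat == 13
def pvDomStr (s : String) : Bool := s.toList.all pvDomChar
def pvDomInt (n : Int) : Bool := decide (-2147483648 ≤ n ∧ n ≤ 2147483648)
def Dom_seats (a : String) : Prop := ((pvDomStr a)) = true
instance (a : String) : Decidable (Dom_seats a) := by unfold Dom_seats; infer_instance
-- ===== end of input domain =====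

-- B computes each window cost by a constant-time sliding-window recurrence on
-- d[t] = b[t] - t with a moving split pointer, instead of A's per-window re-summation.


-- ===== PORT A =====
def seats (a : String) : Int :=
  let cs := a.toList
  let n : Int := cs.length
  let b : List Int := (PySem.List.pyRange 0 n 1).foldl
    (fun acc i => if PySem.List.pyGetD cs i ' ' == 'x' then acc ++ [i] else acc) []
  let k : Int := b.length
  (PySem.List.pyRange 0 (n - k + 1) 1).foldl
    (fun ans i =>
      let c := (PySem.List.pyRange i (i + k) 1).foldl
        (fun c j => PySem.Int.mod (c + |PySem.List.pyGetD b (j - i) 0 - j|) 10000003) 0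
      min ans c) (10 ^ 7)

-- ===== PORT B =====
-- the inner `while p < k and d[p] <= i: p += 1` loop of Source B
def seatsAdvance (d : List Int) (i : Int) (p : Nat) : Nat :=
  if h : p < d.length then
    if d.getD p 0 ≤ i then seatsAdvance d i (p + 1) else p
  else p
termination_by d.length - p

def seats_alt (a : String) : Int :=
  let cs := a.toList
  let b : List Int := ((PySem.List.enumerate cs 0).filter (fun pr => pr.2 == 'x')).map (fun pr => pr.1)
  let n : Int := cs.length
  let k : Int := b.length
  let d : List Int := (PySem.List.pyRange 0 k 1).map (fun t => PySem.List.pyGetD b t 0 - t)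
  let S0 : Int := d.sum
  let ans0 : Int := min (10 ^ 7) (PySem.Int.mod S0 10000003)
  let r := (PySem.List.pyRange 0 (n - k) 1).foldl
    (fun st i =>
      let p' := seatsAdvance d i st.2.1
      let S' := st.1 + 2 * (p' : Int) - k
      (S', p', min st.2.2 (PySem.Int.mod S' 10000003)))
    (S0, (0 : Nat), ans0)
  r.2.2

-- ===== PRECONDITION & SPEC =====
def Spec_seats (a : String) (out : Int) : Prop := out = seats_alt a
instance (a : String) (out : Int) : Decidable (Spec_seats a out) := by unfold Spec_seats; infer_instance

-- ===== CLAIM (what is proved, stated in full; the proofs are below) =====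
def Claim_equal_seats : Prop := ∀ (a : String), Dom_seats a → Spec_seats a (seats a)

-- ===== LEMMAS AND PROOFS =====

def posIdx : List Char → Int → List Int
  | [], _ => []
  | c :: cs, s => (if c == 'x' then [s] else []) ++ posIdx cs (s + 1)

lemma posIdx_ge (cs : List Char) : ∀ (s x : Int), x ∈ posIdx cs s → s ≤ x := by
  induction cs with
  | nil => simp [posIdx]
  | cons c cs ih =>
    intro s x hx
    simp only [posIdx, List.mem_append] at hx
    rcases hx with hx | hx
    · split at hx <;> simp_all
    · have := ih (s + 1) x hx; omega

lemma posIdx_length (cs : List Char) : ∀ s : Int, (posIdx cs s).length ≤ cs.length := by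
  induction cs with
  | nil => simp [posIdx]
  | cons c cs ih =>
    intro s
    have := ih (s + 1)
    simp only [posIdx, List.length_append, List.length_cons]
    split <;> simp <;> omega

lemma posIdx_pairwise (cs : List Char) : ∀ s : Int, (posIdx cs s).Pairwise (· < ·) := by
  induction cs with
  | nil => simp [posIdx]
  | cons c cs ih =>
    intro s
    simp only [posIdx]
    split
    · simp only [List.singleton_append, List.pairwise_cons]
      exact ⟨fun x hx => by have := posIdx_ge cs (s + 1) x hx; omega, ih (s + 1)⟩
    · simpa using ih (s + 1)

lemma bB_eq (cs : List Char) : ∀ s : Int,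
    ((PySem.List.enumerate cs s).filter (fun pr => pr.2 == 'x')).map (fun pr => pr.1)
      = posIdx cs s := by
  induction cs with
  | nil => simp [PySem.List.enumerate, posIdx]
  | cons c cs ih =>
    intro s
    rw [PySem.List.enumerate_cons]
    simp only [List.filter_cons, posIdx]
    by_cases h : c == 'x' <;> simp [h, ih (s + 1)]

lemma pyGetD_cons_succ (c : Char) (cs : List Char) (j : Nat) :
    PySem.List.pyGetD (c :: cs) ((j : Int) + 1) ' ' = PySem.List.pyGetD cs (j : Int) ' ' := by
  have : ((j : Int) + 1) = ((j + 1 : Nat) : Int) := by push_cast; ring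
  rw [this, PySem.List.pyGetD_natCast, PySem.List.pyGetD_natCast, List.getD_cons_succ]

lemma filter_posIdx (cs : List Char) : ∀ s : Int,
    (PySem.List.pyRange s (s + ↑cs.length) 1).filter
        (fun i => PySem.List.pyGetD cs (i - s) ' ' == 'x') = posIdx cs s := by
  induction cs with
  | nil => intro s; simp [PySem.List.pyRange_one_eq_nil, posIdx]
  | cons c cs ih =>
    intro s
    have hlen : s < s + ↑(c :: cs).length := by
      simp only [List.length_cons]; push_cast; omega
    rw [PySem.List.pyRange_one_cons hlen, List.filter_cons]
    have hc : (PySem.List.pyGetD (c :: cs) (s - s) ' ' == 'x') = (c == 'x') := by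
      simp [sub_self, PySem.List.pyGetD_zero_cons]
    have htail :
        (PySem.List.pyRange (s + 1) (s + ↑(c :: cs).length) 1).filter
            (fun i => PySem.List.pyGetD (c :: cs) (i - s) ' ' == 'x')
          = posIdx cs (s + 1) := by
      have hshift : ∀ i ∈ PySem.List.pyRange (s + 1) (s + ↑(c :: cs).length) 1,
          (PySem.List.pyGetD (c :: cs) (i - s) ' ' == 'x')
            = (PySem.List.pyGetD cs (i - (s + 1)) ' ' == 'x') := by
        intro i hi
        rw [PySem.List.mem_pyRange_one] at hi
        have h1 : i - s = (((i - (s + 1)).toNat : Int)) + 1 := by omega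
        have h2 : i - (s + 1) = ((i - (s + 1)).toNat : Int) := by omega
        rw [h1, h2, pyGetD_cons_succ]; simp
      rw [List.filter_congr hshift]
      have hb : s + ↑(c :: cs).length = (s + 1) + ↑cs.length := by
        simp only [List.length_cons]; push_cast; ring
      rw [hb, ih (s + 1)]
    rw [htail, hc]
    simp only [posIdx]
    by_cases h : c == 'x' <;> simp [h]

lemma bA_eq (cs : List Char) :
    ((PySem.List.pyRange 0 (↑cs.length : Int) 1).foldl
      (fun acc i => if PySem.List.pyGetD cs i ' ' == 'x' then acc ++ [i] else acc) [])
      = posIdx cs 0 := by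
  rw [PySem.List.foldl_append_if (fun i => PySem.List.pyGetD cs i ' ' == 'x') (fun i => i)]
  rw [List.nil_append, List.map_id']
  have h := filter_posIdx cs 0
  rw [zero_add] at h
  rw [← h]
  exact List.filter_congr (by intro i _; rw [sub_zero])

-- probe

lemma foldl_mod {α : Type} (M : Int) (f : α → Int) :
    ∀ (l : List α) (c : Int),
      l.foldl (fun acc x => (acc + f x) % M) (c % M) = (c + (l.map f).sum) % M := by
  intro l
  induction l with
  | nil => intro c; simp
  | cons x xs ih =>
    intro c
    simp only [List.foldl_cons, List.map_cons, List.sum_cons]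
    rw [Int.emod_add_emod, ih (c + f x)]
    ring_nf

lemma abs_succ (x i : Int) : |x - (i + 1)| = |x - i| + (if x ≤ i then 1 else -1) := by
  rcases le_or_gt x i with h | h
  · rw [if_pos h, abs_of_nonpos (by omega : x - (i + 1) ≤ 0),
      abs_of_nonpos (by omega : x - i ≤ 0)]; ring
  · rw [if_neg (by omega), abs_of_nonneg (by omega : (0:Int) ≤ x - (i + 1)),
      abs_of_nonneg (by omega : (0:Int) ≤ x - i)]; ring

lemma sum_abs_succ (d : List Int) (i : Int) (r : Nat) (hr : r ≤ d.length)
    (h1 : ∀ x ∈ d.take r, x ≤ i) (h2 : ∀ x ∈ d.drop r, i < x) :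
    (d.map (fun x => |x - (i + 1)|)).sum
      = (d.map (fun x => |x - i|)).sum + 2 * r - d.length := by
  have key : (d.map (fun x => |x - (i + 1)|)).sum
      = (d.map (fun x => |x - i|)).sum
        + (d.map (fun x => if x ≤ i then (1:Int) else -1)).sum := by
    rw [← PySem.List.sum_map_add_int]
    congr 1
    exact List.map_congr_left (fun x _ => abs_succ x i)
  rw [key]
  have hsplit : d = d.take r ++ d.drop r := (List.take_append_drop r d).symm
  have ht : ((d.take r).map (fun x => if x ≤ i then (1:Int) else -1)).sum = (r : Int) := by
    rw [List.map_congr_left (fun x hx => if_pos (h1 x hx)),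
      PySem.List.sum_map_const_int, List.length_take]
    have : min r d.length = r := by omega
    rw [this]; ring
  have hd : ((d.drop r).map (fun x => if x ≤ i then (1:Int) else -1)).sum
      = -((d.length : Int) - r) := by
    rw [List.map_congr_left (fun x hx => if_neg (by have := h2 x hx; omega)),
      PySem.List.sum_map_const_int, List.length_drop]
    push_cast [hr]
    ring
  have hdelta : (d.map (fun x => if x ≤ i then (1:Int) else -1)).sum
      = 2 * r - d.length := by
    conv_lhs => rw [hsplit]
    rw [List.map_append, List.sum_append, ht, hd]
    ring
  rw [hdelta]
  ring

lemma sInc_getD_gap (l : List Int) (hl : l.Pairwise (· < ·)) (s : Nat) :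
    ∀ t : Nat, s ≤ t → t < l.length → l.getD s 0 + ((t : Int) - s) ≤ l.getD t 0 := by
  intro t
  induction t with
  | zero => intro h1 h2; interval_cases s; simp
  | succ t ih =>
    intro h1 h2
    rcases Nat.lt_or_ge s (t + 1) with h | h
    · have hst : s ≤ t := by omega
      have ht : t < l.length := by omega
      have step : l.getD t 0 < l.getD (t + 1) 0 := by
        rw [List.getD_eq_getElem l 0 ht, List.getD_eq_getElem l 0 h2]
        exact List.pairwise_iff_getElem.mp hl t (t + 1) ht h2 (by omega)
      have := ih hst ht
      push_cast
      omega
    · have : s = t + 1 := by omega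
      subst this
      simp

lemma advance_spec (d : List Int)
    (hmono : ∀ s t : Nat, s ≤ t → t < d.length → d.getD s 0 ≤ d.getD t 0) (i : Int) :
    ∀ (p : Nat), p ≤ d.length → (∀ t, t < p → d.getD t 0 ≤ i) →
      p ≤ seatsAdvance d i p ∧ seatsAdvance d i p ≤ d.length ∧
      (∀ t, t < seatsAdvance d i p → d.getD t 0 ≤ i) ∧
      (∀ t, seatsAdvance d i p ≤ t → t < d.length → i < d.getD t 0) := by
  intro p
  induction hm : d.length - p generalizing p with
  | zero =>
    intro hp hlow
    have hple : ¬ p < d.length := by omega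
    rw [seatsAdvance, dif_neg hple]
    refine ⟨le_refl _, hp, hlow, ?_⟩
    intro t h1 h2
    omega
  | succ n ih =>
    intro hp hlow
    have hplt : p < d.length := by omega
    rw [seatsAdvance, dif_pos hplt]
    by_cases hle : d.getD p 0 ≤ i
    · rw [if_pos hle]
      have := ih (p + 1) (by omega) (by omega) (by
        intro t ht
        rcases Nat.lt_or_ge t p with h | h
        · exact hlow t h
        · have : t = p := by omega
          subst this; exact hle)
      exact ⟨by omega, this.2.1, this.2.2.1, this.2.2.2⟩
    · rw [if_neg hle]
      refine ⟨le_refl _, by omega, hlow, ?_⟩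
      intro t h1 h2
      have := hmono p t h1 h2
      omega

lemma inner_eq (b : List Int) (i : Int) :
    (PySem.List.pyRange i (i + ↑b.length) 1).foldl
        (fun c j => PySem.Int.mod (c + |PySem.List.pyGetD b (j - i) 0 - j|) 10000003) 0
      = ((List.range b.length).map (fun t => |b.getD t 0 - ↑t - i|)).sum % 10000003 := by
  rw [PySem.List.pyRange_one]
  have hb : (i + ↑b.length - i).toNat = b.length := by
    have : i + ↑b.length - i = (b.length : Int) := by ring
    rw [this, Int.toNat_natCast]
  rw [hb, List.foldl_map]
  have hstep : (fun (c : Int) (k : Nat) =>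
        PySem.Int.mod (c + |PySem.List.pyGetD b (i + ↑k - i) 0 - (i + ↑k)|) 10000003)
      = (fun (c : Int) (k : Nat) => (c + |b.getD k 0 - ↑k - i|) % 10000003) := by
    funext c k
    rw [PySem.Int.mod_eq_emod_of_pos (by norm_num)]
    have h1 : i + (k : Int) - i = (k : Int) := by ring
    rw [h1, PySem.List.pyGetD_natCast]
    congr 2
    rw [show b.getD k 0 - (i + ↑k) = b.getD k 0 - ↑k - i from by ring]
  rw [hstep]
  have hf := foldl_mod 10000003 (fun t : Nat => |b.getD t 0 - ↑t - i|) (List.range b.length) 0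
  rw [show ((0:Int) % 10000003) = 0 from by norm_num, zero_add] at hf
  exact hf

lemma loopB (d : List Int) (N : Int)
    (hmono : ∀ s t : Nat, s ≤ t → t < d.length → d.getD s 0 ≤ d.getD t 0) :
    ∀ (m : Int) (p : Nat) (ans : Int), m ≤ N → p ≤ d.length →
      (∀ t, t < p → d.getD t 0 ≤ m) →
      ((PySem.List.pyRange m N 1).foldl
        (fun st i =>
          let p' := seatsAdvance d i st.2.1
          let S' := st.1 + 2 * (p' : Int) - ↑d.length
          (S', p', min st.2.2 (PySem.Int.mod S' 10000003)))
        ((d.map (fun x => |x - m|)).sum, p, ans)).2.2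
      = (PySem.List.pyRange (m + 1) (N + 1) 1).foldl
          (fun a i => min a ((d.map (fun x => |x - i|)).sum % 10000003)) ans := by
  intro m p ans
  induction hn : (N - m).toNat generalizing m p ans with
  | zero =>
    intro hmN hp hlow
    have h1 : N ≤ m := by omega
    rw [PySem.List.pyRange_one_eq_nil h1, PySem.List.pyRange_one_eq_nil (show N + 1 ≤ m + 1 by omega)]
    rfl
  | succ n ih =>
    intro hmN hp hlow
    have hlt : m < N := by omega
    rw [PySem.List.pyRange_one_cons hlt, PySem.List.pyRange_one_cons (show m + 1 < N + 1 by omega)]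
    simp only [List.foldl_cons]
    have hadv := advance_spec d hmono m p hp hlow
    set r := seatsAdvance d m p with hr
    have hstep : (d.map (fun x => |x - m|)).sum + 2 * (r : Int) - ↑d.length
        = (d.map (fun x => |x - (m + 1)|)).sum := by
      rw [sum_abs_succ d m r hadv.2.1
        (by
          intro x hx
          obtain ⟨j, hj, hjx⟩ := List.mem_iff_getElem.mp hx
          have hjr : j < r := by
            have := hj; rw [List.length_take] at this; omega
          have hjd : j < d.length := by
            have := hadv.2.1; omega
          have : x = d.getD j 0 := by
            rw [List.getD_eq_getElem d 0 hjd, ← hjx, List.getElem_take]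
          rw [this]
          exact hadv.2.2.1 j hjr)
        (by
          intro x hx
          obtain ⟨j, hj, hjx⟩ := List.mem_iff_getElem.mp hx
          rw [List.length_drop] at hj
          have hjd : r + j < d.length := by omega
          have : x = d.getD (r + j) 0 := by
            rw [List.getD_eq_getElem d 0 hjd, ← hjx, List.getElem_drop]
          rw [this]
          exact hadv.2.2.2 (r + j) (by omega) hjd)]
    rw [hstep]
    have hmod : PySem.Int.mod ((d.map (fun x => |x - (m + 1)|)).sum) 10000003
        = ((d.map (fun x => |x - (m + 1)|)).sum) % 10000003 :=
      PySem.Int.mod_eq_emod_of_pos (by norm_num)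
    rw [hmod]
    exact ih (m + 1) r (min ans ((d.map (fun x => |x - (m + 1)|)).sum % 10000003))
      (by omega) (by omega) hadv.2.1
      (fun t ht => le_trans (hadv.2.2.1 t ht) (by omega))

-- ===== VERDICT (by name: the statement is the Claim_ definition above) =====
theorem seats_spec : Claim_equal_seats := by
  intro a _
  unfold Spec_seats
  simp only [seats, seats_alt]
  generalize a.toList = cs
  rw [bA_eq cs, bB_eq cs 0]
  have hbpair := posIdx_pairwise cs 0
  have hbge := posIdx_ge cs 0
  have hblen := posIdx_length cs 0
  generalize hB : posIdx cs 0 = b at hbpair hbge hblen ⊢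
  set d := (PySem.List.pyRange 0 (↑b.length : Int) 1).map
      (fun t => PySem.List.pyGetD b t 0 - t) with hd
  have d_eq : d = (List.range b.length).map (fun t => b.getD t 0 - (t : Int)) := by
    rw [hd, PySem.List.pyRange_zero_nat, List.map_map]
    simp [Function.comp_def]
  have ld : d.length = b.length := by rw [d_eq]; simp
  have d_getD : ∀ t, t < d.length → d.getD t 0 = b.getD t 0 - t := by
    intro t ht
    have htb : t < b.length := by omega
    rw [d_eq, List.getD_eq_getElem _ 0 (by simpa using htb), List.getElem_map,
      List.getElem_range, List.getD_eq_getElem b 0 htb]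
  have hb0 : ∀ t, t < b.length → 0 ≤ b.getD t 0 := by
    intro t ht
    apply hbge
    rw [List.getD_eq_getElem b 0 ht]
    exact List.getElem_mem _
  have hgap := sInc_getD_gap b hbpair
  have hd_nonneg : ∀ t, t < d.length → 0 ≤ d.getD t 0 := by
    intro t ht
    rw [d_getD t ht]
    have h1 := hgap 0 t (by omega) (by omega)
    have h0 := hb0 0 (by omega)
    push_cast at h1
    omega
  have hmono : ∀ s t : Nat, s ≤ t → t < d.length → d.getD s 0 ≤ d.getD t 0 := by
    intro s t hst ht
    rw [d_getD s (by omega), d_getD t ht]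
    have h1 := hgap s t hst (by omega)
    push_cast at h1 ⊢
    omega
  have F_eq : ∀ i : Int, ((List.range b.length).map (fun t => |b.getD t 0 - ↑t - i|)).sum
      = (d.map (fun x => |x - i|)).sum := by
    intro i
    rw [d_eq, List.map_map]
    simp [Function.comp_def]
  have dmap0 : d.map (fun x => |x - 0|) = d := by
    have h : ∀ x ∈ d, |x - 0| = id x := by
      intro x hx
      obtain ⟨j, hj, rfl⟩ := List.mem_iff_getElem.mp hx
      have h2 := hd_nonneg j hj
      rw [List.getD_eq_getElem d 0 hj] at h2
      simp [abs_of_nonneg h2]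
    rw [List.map_congr_left h, List.map_id]
  have hinner : (fun (ans i : Int) => min ans ((PySem.List.pyRange i (i + ↑b.length) 1).foldl
        (fun c j => PySem.Int.mod (c + |PySem.List.pyGetD b (j - i) 0 - j|) 10000003) 0))
      = (fun (ans i : Int) => min ans ((d.map (fun x => |x - i|)).sum % 10000003)) := by
    funext ans i
    rw [inner_eq b i, F_eq i]
  rw [hinner]
  have hN : (0:Int) < ↑cs.length - ↑b.length + 1 := by
    have := hblen
    omega
  rw [PySem.List.pyRange_one_cons hN, List.foldl_cons, zero_add]
  rw [show PySem.Int.mod d.sum 10000003 = d.sum % 10000003 from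
    PySem.Int.mod_eq_emod_of_pos (by norm_num)]
  rw [show d.sum = (d.map (fun x => |x - 0|)).sum from by rw [dmap0]]
  have hloop := loopB d (↑cs.length - ↑b.length) hmono 0 0
      (min (10 ^ 7) ((d.map (fun x => |x - 0|)).sum % 10000003))
      (by omega) (by omega) (by omega)
  rw [zero_add] at hloop
  rw [ld] at hloop
  rw [hloop]
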